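-- pv_equiv track=rewrite | github.com/jjsalinas/Cripto | cifrado_flujo.py | NLFSR
-- ===== SOURCE A (Python) =====
-- def NLFSR(polinomio, semilla, k):
--     res=semilla[:]
--     while len(res)<k:
--         l=len(res)-1
--         l_func=len(polinomio)
--         nvar=len(polinomio[0])
--         aux=0
--         for i in range(l_func):
--             for j in range(nvar):
--                 aux+=res[l-(nvar-1)+j]*polinomio[i][j]
--         aux=aux%2
--         res.append(aux)
--     return res
-- ===== SOURCE B (Python) =====
-- def NLFSR(polinomio, semilla, k):
--     res = semilla[:]
--     if len(res) < k:
--         nvar = len(polinomio[0])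
--         colsum = [sum(fila[j] for fila in polinomio) for j in range(nvar)]
--         while len(res) < k:
--             l = len(res) - 1
--             aux = 0
--             for j in range(nvar):
--                 aux += res[l - (nvar - 1) + j] * colsum[j]
--             res.append(aux % 2)
--     return res
-- ===== Notes on version B (the rewrite author's own statement) =====
-- stated objective: alternative
-- what changed: B precomputes once the column-sum table colsum[j] = sum of polinomio[i][j] over all rows (the feedback term factors through the columns), so each generated bit is a single length-nvar inner product with the table instead of A's per-step l_func x nvar double loop.
import Mathlib
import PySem

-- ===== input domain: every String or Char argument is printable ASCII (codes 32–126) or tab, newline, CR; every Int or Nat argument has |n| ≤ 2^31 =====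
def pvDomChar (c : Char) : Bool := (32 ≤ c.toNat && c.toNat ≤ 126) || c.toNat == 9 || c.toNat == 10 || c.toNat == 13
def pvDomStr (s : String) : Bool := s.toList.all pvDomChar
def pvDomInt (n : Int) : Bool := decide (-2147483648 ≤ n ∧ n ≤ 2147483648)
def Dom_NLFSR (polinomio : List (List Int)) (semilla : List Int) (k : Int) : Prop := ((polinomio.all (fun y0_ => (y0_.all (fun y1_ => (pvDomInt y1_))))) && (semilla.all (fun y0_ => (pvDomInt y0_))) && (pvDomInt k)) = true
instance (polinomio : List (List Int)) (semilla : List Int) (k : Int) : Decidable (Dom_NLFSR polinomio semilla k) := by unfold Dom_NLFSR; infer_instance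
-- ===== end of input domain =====

-- B replaces A's per-step (l_func × nvar) double scan by a one-time column-sum table plus a
-- single length-nvar inner product with that table per generated bit (objective: alternative).

-- ===== PORT A =====
-- while len(res) < k, one bit appended per iteration: fuel (k - len(semilla)).toNat counts the iterations.
-- res[...]/polinomio[i][j] are ported with pyGetD; Pre_NLFSR keeps every index in Python range.
def NLFSR_loopA (polinomio : List (List Int)) (k : Int) : Nat → List Int → List Int
  | 0, res => res
  | fuel + 1, res =>
    if (res.length : Int) < k then
      let l : Int := (res.length : Int) - 1
      let l_func : Int := PySem.List.len polinomio
      let nvar : Int := PySem.List.len (PySem.List.pyGetD polinomio 0 [])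
      let aux : Int := (PySem.List.pyRange 0 l_func 1).foldl (fun a i =>
        (PySem.List.pyRange 0 nvar 1).foldl (fun a j =>
          a + PySem.List.pyGetD res (l - (nvar - 1) + j) 0 *
              PySem.List.pyGetD (PySem.List.pyGetD polinomio i []) j 0) a) 0
      NLFSR_loopA polinomio k fuel (res ++ [PySem.Int.mod aux 2])
    else res

def NLFSR (polinomio : List (List Int)) (semilla : List Int) (k : Int) : List Int :=
  NLFSR_loopA polinomio k (k - (semilla.length : Int)).toNat semilla

-- ===== PORT B =====
def NLFSR_loopB (k : Int) (nvar : Int) (colsum : List Int) : Nat → List Int → List Int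
  | 0, res => res
  | fuel + 1, res =>
    if (res.length : Int) < k then
      let l : Int := (res.length : Int) - 1
      let aux : Int := (PySem.List.pyRange 0 nvar 1).foldl (fun a j =>
        a + PySem.List.pyGetD res (l - (nvar - 1) + j) 0 * PySem.List.pyGetD colsum j 0) 0
      NLFSR_loopB k nvar colsum fuel (res ++ [PySem.Int.mod aux 2])
    else res

def NLFSR_alt (polinomio : List (List Int)) (semilla : List Int) (k : Int) : List Int :=
  if (semilla.length : Int) < k then
    let nvar : Int := PySem.List.len (PySem.List.pyGetD polinomio 0 [])
    let colsum : List Int := (PySem.List.pyRange 0 nvar 1).map (fun j =>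
      polinomio.foldl (fun a fila => a + PySem.List.pyGetD fila j 0) 0)
    NLFSR_loopB k nvar colsum (k - (semilla.length : Int)).toNat semilla
  else semilla

-- ===== PRECONDITION & SPEC =====
-- Pre_ excludes exactly the inputs where the Python A raises IndexError: when the loop runs,
-- polinomio must be nonempty, every row at least nvar long, and nvar ≤ 2*len(semilla) so the
-- first feedback index stays in Python's (possibly negative) range.
def Pre_NLFSR (polinomio : List (List Int)) (semilla : List Int) (k : Int) : Prop :=
  (semilla.length : Int) < k →
    (polinomio ≠ [] ∧
     (∀ fila ∈ polinomio, (polinomio.headD []).length ≤ fila.length) ∧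
     (polinomio.headD []).length ≤ 2 * semilla.length)
instance (polinomio : List (List Int)) (semilla : List Int) (k : Int) : Decidable (Pre_NLFSR polinomio semilla k) := by unfold Pre_NLFSR; infer_instance

def pvWitness_NLFSR : List (List Int) × List Int × Int := ([[1, 0, 1], [0, 1, 1]], [1, 0], 7)

def Spec_NLFSR (polinomio : List (List Int)) (semilla : List Int) (k : Int) (out : List Int) : Prop := out = NLFSR_alt polinomio semilla k
instance (polinomio : List (List Int)) (semilla : List Int) (k : Int) (out : List Int) : Decidable (Spec_NLFSR polinomio semilla k out) := by unfold Spec_NLFSR; infer_instance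

-- ===== CLAIM (what is proved, stated in full; the proofs are below) =====
def Claim_equal_NLFSR : Prop := ∀ (polinomio : List (List Int)) (semilla : List Int) (k : Int), Dom_NLFSR polinomio semilla k → Pre_NLFSR polinomio semilla k → Spec_NLFSR polinomio semilla k (NLFSR polinomio semilla k)

-- ===== LEMMAS AND PROOFS =====

lemma NLFSR_swap_sum (P : List (List Int)) (R : List Int) (r : Int → Int) (q : List Int → Int → Int) :
    (P.map (fun fila => (R.map (fun j => r j * q fila j)).sum)).sum
    = (R.map (fun j => r j * (P.map (fun fila => q fila j)).sum)).sum := by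
  induction P with
  | nil => simp
  | cons fila P ih =>
    simp only [List.map_cons, List.sum_cons, ih, mul_add]
    rw [← PySem.List.sum_map_add_int]

-- the two per-step feedback sums coincide (factoring the double scan through the column sums)
lemma NLFSR_step_eq (polinomio : List (List Int)) (res : List Int) (l nvar : Int) :
    (PySem.List.pyRange 0 (PySem.List.len polinomio) 1).foldl (fun a i =>
        (PySem.List.pyRange 0 nvar 1).foldl (fun a j =>
          a + PySem.List.pyGetD res (l - (nvar - 1) + j) 0 *
              PySem.List.pyGetD (PySem.List.pyGetD polinomio i []) j 0) a) 0
    = (PySem.List.pyRange 0 nvar 1).foldl (fun a j =>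
        a + PySem.List.pyGetD res (l - (nvar - 1) + j) 0 *
            PySem.List.pyGetD ((PySem.List.pyRange 0 nvar 1).map (fun j =>
              polinomio.foldl (fun a fila => a + PySem.List.pyGetD fila j 0) 0)) j 0) 0 := by
  rw [PySem.List.len_eq, PySem.List.foldl_pyRange_pyGetD' polinomio []
    (fun acc fila => (PySem.List.pyRange 0 nvar 1).foldl (fun a j =>
      a + PySem.List.pyGetD res (l - (nvar - 1) + j) 0 * PySem.List.pyGetD fila j 0) acc) 0 (by omega)]
  simp only [Int.toNat_zero, List.drop_zero]
  have hin : ∀ (fila : List Int) (acc : Int),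
      (PySem.List.pyRange 0 nvar 1).foldl (fun a j =>
        a + PySem.List.pyGetD res (l - (nvar - 1) + j) 0 * PySem.List.pyGetD fila j 0) acc
      = acc + ((PySem.List.pyRange 0 nvar 1).map (fun j =>
          PySem.List.pyGetD res (l - (nvar - 1) + j) 0 * PySem.List.pyGetD fila j 0)).sum := by
    intro fila acc
    exact PySem.List.foldl_add _ _ _
  simp only [hin]
  rw [PySem.List.foldl_add]
  simp only [zero_add]
  rw [NLFSR_swap_sum polinomio _ (fun j => PySem.List.pyGetD res (l - (nvar - 1) + j) 0)
      (fun fila j => PySem.List.pyGetD fila j 0)]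
  apply congrArg
  apply List.map_congr_left
  intro j hj
  have hjb := (PySem.List.mem_pyRange_one).1 hj
  rw [PySem.List.pyGetD_map_pyRange_of_nonneg _ nvar j 0 hjb.1 hjb.2,
      PySem.List.foldl_add]
  simp

lemma NLFSR_loop_eq (polinomio : List (List Int)) (k nvar : Int) (colsum : List Int)
    (hnv : nvar = PySem.List.len (PySem.List.pyGetD polinomio 0 []))
    (hcs : colsum = (PySem.List.pyRange 0 nvar 1).map (fun j =>
      polinomio.foldl (fun a fila => a + PySem.List.pyGetD fila j 0) 0)) :
    ∀ (fuel : Nat) (res : List Int),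
      NLFSR_loopA polinomio k fuel res = NLFSR_loopB k nvar colsum fuel res := by
  intro fuel
  induction fuel with
  | zero => intro res; rfl
  | succ n ih =>
    intro res
    rw [NLFSR_loopA, NLFSR_loopB]
    by_cases h : (res.length : Int) < k
    · simp only [if_pos h]
      rw [ih, ← hnv, hcs, NLFSR_step_eq]
    · simp only [if_neg h]

-- ===== VERDICT (by name: the statement is the Claim_ definition above) =====
theorem NLFSR_spec : Claim_equal_NLFSR := by
  intro polinomio semilla k _ _
  unfold Spec_NLFSR NLFSR NLFSR_alt
  by_cases h : (semilla.length : Int) < k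
  · simp only [if_pos h]
    exact NLFSR_loop_eq polinomio k _ _ rfl rfl _ semilla
  · simp only [if_neg h]
    have hf : (k - (semilla.length : Int)).toNat = 0 := by omega
    rw [hf]
    rfl
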